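-- pv_equiv track=rewrite | github.com/blizzard-labs/historianEval | src/model_gen_aa/modelfit.py | _categorize_parameters
-- ===== SOURCE A (Python) =====
-- def _categorize_parameters(available_params):
--     """Categorize parameters for better organization"""
--     categories = {
--         'Tree Structure': [p for p in available_params if any(keyword in p.lower() for keyword in
--                         ['n_sequences', 'crown_age', 'colless', 'gamma'])],
--         'Sequence Evolution': [p for p in available_params if any(keyword in p.lower() for keyword in
--                             ['alignment_length', 'gamma_shape', 'prop_invariant'])],
--         'Indel Parameters': [p for p in available_params if any(keyword in p.lower() for keyword in
--                             ['insertion', 'deletion'])],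
--         'Birth-Death Models': [p for p in available_params if p.startswith('best_B')]
--     }
--
--     # Add any uncategorized parameters to a general category
--     categorized = set()
--     for cat_params in categories.values():
--         categorized.update(cat_params)
--
--     uncategorized = [p for p in available_params if p not in categorized]
--     if uncategorized:
--         categories['Other'] = uncategorized
--
--     # Remove empty categories
--     categories = {k: v for k, v in categories.items() if v}
--
--     return categories
-- ===== SOURCE B (Python) =====
-- def _categorize_parameters(available_params):
--     """Categorize parameters for better organization (single pass)."""
--     groups = [
--         ('Tree Structure',
--          lambda p: any(k in p for k in ['n_sequences', 'crown_age', 'colless', 'gamma'])),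
--         ('Sequence Evolution',
--          lambda p: any(k in p for k in ['alignment_length', 'gamma_shape', 'prop_invariant'])),
--         ('Indel Parameters',
--          lambda p: any(k in p for k in ['insertion', 'deletion'])),
--     ]
--     buckets = {name: [] for name, _ in groups}
--     buckets['Birth-Death Models'] = []
--     other = []
--     for p in available_params:
--         lp = p.lower()
--         matched = False
--         for name, pred in groups:
--             if pred(lp):
--                 buckets[name].append(p)
--                 matched = True
--         if p.startswith('best_B'):
--             buckets['Birth-Death Models'].append(p)
--             matched = True
--         if not matched:
--             other.append(p)
--     result = {name: ps for name, ps in buckets.items() if ps}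
--     if other:
--         result['Other'] = other
--     return result
-- ===== Notes on version B (the rewrite author's own statement) =====
-- stated objective: alternative
-- what changed: A runs four separate filter passes plus a set-membership pass for 'Other'; B makes ONE pass over available_params, testing each param against every category predicate, appending it to all matching buckets and to 'other' when none match, then assembles the non-empty categories in the fixed key order.
import Mathlib
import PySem

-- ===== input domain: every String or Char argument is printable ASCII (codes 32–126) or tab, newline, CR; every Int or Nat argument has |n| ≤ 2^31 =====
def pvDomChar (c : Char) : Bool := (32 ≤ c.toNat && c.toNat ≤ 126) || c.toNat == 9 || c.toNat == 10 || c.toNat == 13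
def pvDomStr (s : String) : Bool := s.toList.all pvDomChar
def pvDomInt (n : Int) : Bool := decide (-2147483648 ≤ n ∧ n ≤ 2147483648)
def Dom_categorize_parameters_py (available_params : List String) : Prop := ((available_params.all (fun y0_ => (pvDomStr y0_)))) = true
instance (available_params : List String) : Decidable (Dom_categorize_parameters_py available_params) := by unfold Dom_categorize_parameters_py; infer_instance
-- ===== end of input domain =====

-- ===== PORT A =====
-- B makes one pass over available_params instead of A's four filters plus a set pass; same result.
def pyLowHas (kws : List String) (p : String) : Bool :=
  kws.any (fun k => PySem.Str.isIn k (PySem.Str.lower p))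

def categorize_parameters_py (available_params : List String) : List (String × List String) :=
  let categories : List (String × List String) :=
    [("Tree Structure",
        available_params.filter (fun p => pyLowHas ["n_sequences", "crown_age", "colless", "gamma"] p)),
     ("Sequence Evolution",
        available_params.filter (fun p => pyLowHas ["alignment_length", "gamma_shape", "prop_invariant"] p)),
     ("Indel Parameters",
        available_params.filter (fun p => pyLowHas ["insertion", "deletion"] p)),
     ("Birth-Death Models",
        available_params.filter (fun p => PySem.Str.startswith p "best_B"))]
  let categorized : PySem.Set String :=
    (categories.map Prod.snd).foldl PySem.Set.update PySem.Set.empty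
  let uncategorized := available_params.filter (fun p => !(PySem.Set.contains categorized p))
  let categories := if uncategorized.isEmpty then categories else categories ++ [("Other", uncategorized)]
  categories.filter (fun kv => !kv.2.isEmpty)

-- ===== PORT B =====
def bKwHas (kws : List String) (lp : String) : Bool := kws.any (fun k => PySem.Str.isIn k lp)

def bStep (st : List String × List String × List String × List String × List String)
    (p : String) : List String × List String × List String × List String × List String :=
  let (t, s, i, b, o) := st
  let lp := PySem.Str.lower p
  let mt := bKwHas ["n_sequences", "crown_age", "colless", "gamma"] lp
  let ms := bKwHas ["alignment_length", "gamma_shape", "prop_invariant"] lp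
  let mi := bKwHas ["insertion", "deletion"] lp
  let mb := PySem.Str.startswith p "best_B"
  (if mt then t ++ [p] else t,
   if ms then s ++ [p] else s,
   if mi then i ++ [p] else i,
   if mb then b ++ [p] else b,
   if mt || ms || mi || mb then o else o ++ [p])

def categorize_parameters_py_alt (available_params : List String) : List (String × List String) :=
  let st := available_params.foldl bStep ([], [], [], [], [])
  let (t, s, i, b, o) := st
  (if t.isEmpty then [] else [("Tree Structure", t)]) ++
  (if s.isEmpty then [] else [("Sequence Evolution", s)]) ++
  (if i.isEmpty then [] else [("Indel Parameters", i)]) ++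
  (if b.isEmpty then [] else [("Birth-Death Models", b)]) ++
  (if o.isEmpty then [] else [("Other", o)])

-- ===== PRECONDITION & SPEC =====
def Spec_categorize_parameters_py (available_params : List String) (out : List (String × List String)) : Prop := out = categorize_parameters_py_alt available_params
instance (available_params : List String) (out : List (String × List String)) : Decidable (Spec_categorize_parameters_py available_params out) := by unfold Spec_categorize_parameters_py; infer_instance

-- ===== CLAIM (what is proved, stated in full; the proofs are below) =====
def Claim_equal_categorize_parameters_py : Prop := ∀ (available_params : List String), Dom_categorize_parameters_py available_params → Spec_categorize_parameters_py available_params (categorize_parameters_py available_params)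

-- ===== LEMMAS AND PROOFS =====

def predT (p : String) : Bool := pyLowHas ["n_sequences", "crown_age", "colless", "gamma"] p
def predS (p : String) : Bool := pyLowHas ["alignment_length", "gamma_shape", "prop_invariant"] p
def predI (p : String) : Bool := pyLowHas ["insertion", "deletion"] p
def predB (p : String) : Bool := PySem.Str.startswith p "best_B"
def predO (p : String) : Bool := !(predT p || predS p || predI p || predB p)

theorem bStep_filters (ps : List String) (t s i b o : List String) :
    ps.foldl bStep (t, s, i, b, o) =
      (t ++ ps.filter predT, s ++ ps.filter predS, i ++ ps.filter predI,
       b ++ ps.filter predB, o ++ ps.filter predO) := by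
  induction ps generalizing t s i b o with
  | nil => simp
  | cons p ps ih =>
    simp only [List.foldl_cons, bStep, List.filter_cons]
    rw [ih]
    simp only [predT, predS, predI, predB, predO, pyLowHas, bKwHas]
    split_ifs <;> simp_all

theorem uncat_filter (f1 f2 f3 f4 : String → Bool) (ps : List String) :
    ps.filter (fun p => !(PySem.Set.contains
      (([ps.filter f1, ps.filter f2, ps.filter f3, ps.filter f4] :
        List (List String)).foldl PySem.Set.update PySem.Set.empty) p)) =
    ps.filter (fun p => !(f1 p || f2 p || f3 p || f4 p)) := by
  apply List.filter_congr
  intro p hp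
  have hceq : PySem.Set.contains
      (([ps.filter f1, ps.filter f2, ps.filter f3, ps.filter f4] :
        List (List String)).foldl PySem.Set.update PySem.Set.empty) p
      = (f1 p || f2 p || f3 p || f4 p) := by
    rw [Bool.eq_iff_iff]
    simp only [List.foldl_cons, List.foldl_nil, PySem.Set.contains_eq_listContains,
      List.contains_iff_mem, PySem.Set.mem_update, PySem.Set.empty, List.mem_filter,
      List.not_mem_nil, Bool.or_eq_true, false_or]
    constructor
    · rintro (((⟨_, h⟩ | ⟨_, h⟩) | ⟨_, h⟩) | ⟨_, h⟩) <;> simp [h]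
    · rintro (((h | h) | h) | h) <;> simp [hp, h]
  rw [hceq]

-- ===== VERDICT (by name: the statement is the Claim_ definition above) =====
theorem categorize_parameters_py_spec : Claim_equal_categorize_parameters_py := by
  intro ps _
  unfold Spec_categorize_parameters_py categorize_parameters_py categorize_parameters_py_alt
  rw [bStep_filters]
  simp only [List.map_cons, List.map_nil, List.nil_append]
  rw [uncat_filter]
  unfold predO predT predS predI predB pyLowHas
  cases h1 : (ps.filter (fun p => List.any ["n_sequences", "crown_age", "colless", "gamma"]
      (fun k => PySem.Str.isIn k (PySem.Str.lower p)))).isEmpty <;>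
  cases h2 : (ps.filter (fun p => List.any ["alignment_length", "gamma_shape", "prop_invariant"]
      (fun k => PySem.Str.isIn k (PySem.Str.lower p)))).isEmpty <;>
  cases h3 : (ps.filter (fun p => List.any ["insertion", "deletion"]
      (fun k => PySem.Str.isIn k (PySem.Str.lower p)))).isEmpty <;>
  cases h4 : (ps.filter (fun p => PySem.Str.startswith p "best_B")).isEmpty <;>
  cases h5 : (ps.filter (fun p => !(List.any ["n_sequences", "crown_age", "colless", "gamma"]
      (fun k => PySem.Str.isIn k (PySem.Str.lower p)) ||
      List.any ["alignment_length", "gamma_shape", "prop_invariant"]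
      (fun k => PySem.Str.isIn k (PySem.Str.lower p)) ||
      List.any ["insertion", "deletion"] (fun k => PySem.Str.isIn k (PySem.Str.lower p)) ||
      PySem.Str.startswith p "best_B"))).isEmpty <;>
  simp only [List.filter_cons, List.filter_nil, List.filter_append, h1, h2, h3, h4, h5,
    Bool.not_false, Bool.not_true, Bool.false_eq_true, if_false, eq_self_iff_true, if_true, List.cons_append, List.nil_append, List.append_nil]
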